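-- pv_equiv track=rewrite | github.com/seung-hun-h/algorithm | 0_4.programmers/kakao#2/python/KAKAO32.py | solution
-- ===== SOURCE A (Python) =====
-- def solution(food_times, k):
--     n = len(food_times)
--     foods = sorted([[food, idx] for idx, food in enumerate(food_times, 1)], key = lambda x: x[0])
--
--     prev_amount = 0
--
--     for j, [amount, idx] in enumerate(foods):
--         diff = (amount - prev_amount) * n
--
--         if (diff > k):
--             k %= n
--             result = sorted(foods[j:], key = lambda x : x[1])
--             return result[k][1]
--         else:
--             k -= diff
--             prev_amount = amount
--
--         n -= 1
--
--     return -1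
-- ===== SOURCE B (Python) =====
-- def solution(food_times, k):
--     total = sum(food_times)
--     if total <= k:
--         return -1
--     # binary search the largest level m with eaten(m) = sum(min(f, m)) <= k
--     lo, hi = 0, max(food_times)
--     while lo < hi:
--         mid = (lo + hi + 1) // 2
--         if sum(min(f, mid) for f in food_times) <= k:
--             lo = mid
--         else:
--             hi = mid - 1
--     t = k - sum(min(f, lo) for f in food_times)
--     rem = [i for i, f in enumerate(food_times, 1) if f > lo]
--     return rem[t]
-- ===== Notes on version B (the rewrite author's own statement) =====
-- stated objective: alternative
-- what changed: Replaces A's sort-by-amount level subtraction (plus a second sort of the suffix) with a sort-free binary search for the largest fully-eaten level m, then a single pass picking the (k - eaten(m))-th food with amount > m in index order.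
-- outside the precondition, e.g. on solution([1, 1], -3): A returns 2, B raises IndexError
import Mathlib
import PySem

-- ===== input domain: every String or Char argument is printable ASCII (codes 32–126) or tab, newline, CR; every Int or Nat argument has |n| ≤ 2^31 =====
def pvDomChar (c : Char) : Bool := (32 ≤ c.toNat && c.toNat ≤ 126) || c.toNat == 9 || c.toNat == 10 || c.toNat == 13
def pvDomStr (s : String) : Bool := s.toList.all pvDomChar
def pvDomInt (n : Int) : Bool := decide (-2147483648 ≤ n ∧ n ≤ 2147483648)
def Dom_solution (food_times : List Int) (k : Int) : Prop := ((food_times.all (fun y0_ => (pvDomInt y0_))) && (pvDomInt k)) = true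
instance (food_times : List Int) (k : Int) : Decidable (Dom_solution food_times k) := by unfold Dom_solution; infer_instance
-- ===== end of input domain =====

-- B replaces A's sort-by-amount level subtraction (with a second sort of the suffix) by a
-- sort-free binary search for the largest fully-eaten level, then one indexed pass (objective: alternative).

-- ===== PORT A =====
-- the for-loop over the sorted foods; carries the suffix foods[j:], n, k, prev_amount
def solutionGo : List (Int × Int) → Int → Int → Int → Int
  | [], _, _, _ => -1
  | (amount, idx) :: rest, n, k, prev =>
      let diff := (amount - prev) * n
      if diff > k then
        -- result[k % n][1]; here 0 ≤ k % n < n = len(result), so the default is never used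
        (PySem.List.pyGetD (PySem.List.sorted ((amount, idx) :: rest) (fun x => x.2) false)
          (PySem.Int.mod k n) (0, 0)).2
      else solutionGo rest (n - 1) (k - diff) amount

def solution (food_times : List Int) (k : Int) : Int :=
  let n : Int := food_times.length
  let foods := PySem.List.sorted
    ((PySem.List.enumerate food_times 1).map (fun p => (p.2, p.1))) (fun x => x.1) false
  solutionGo foods n k 0

-- ===== PORT B =====
-- while lo < hi: bisect on the eaten-amount-at-level function
def bsearchGo (food_times : List Int) (k lo hi : Int) : Int :=
  if _h : lo < hi then
    let mid := PySem.Int.floordiv (lo + hi + 1) 2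
    if (food_times.map (fun f => min f mid)).sum ≤ k then bsearchGo food_times k mid hi
    else bsearchGo food_times k lo (mid - 1)
  else lo
termination_by (hi - lo).toNat
decreasing_by
  · simp only [PySem.Int.floordiv_eq_ediv_of_pos (by omega : (0:Int) < 2)] at *; omega
  · simp only [PySem.Int.floordiv_eq_ediv_of_pos (by omega : (0:Int) < 2)] at *; omega

def solution_alt (food_times : List Int) (k : Int) : Int :=
  let total := food_times.sum
  if total ≤ k then -1
  else
    -- max(food_times); only reached when total > k, so the list is nonempty and the default unused
    let m := bsearchGo food_times k 0 ((PySem.List.max? food_times (fun x => x)).getD 0)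
    let t := k - (food_times.map (fun f => min f m)).sum
    let rem := ((PySem.List.enumerate food_times 1).filter (fun p => m < p.2)).map (fun p => p.1)
    PySem.List.pyGetD rem t 0

-- ===== PRECONDITION & SPEC =====
-- Pre_ excludes negative k (outside the problem's natural domain): A's Python-mod indexing still
-- returns a food index there, while B's level search can raise IndexError.
def Pre_solution (food_times : List Int) (k : Int) : Prop := 0 ≤ k
instance (food_times : List Int) (k : Int) : Decidable (Pre_solution food_times k) := by
  unfold Pre_solution; infer_instance

def pvWitness_solution : List Int × Int := ([3, 1, 2], 5)

def Spec_solution (food_times : List Int) (k : Int) (out : Int) : Prop := out = solution_alt food_times k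
instance (food_times : List Int) (k : Int) (out : Int) : Decidable (Spec_solution food_times k out) := by
  unfold Spec_solution; infer_instance

-- ===== CLAIM (what is proved, stated in full; the proofs are below) =====
def Claim_equal_solution : Prop := ∀ (food_times : List Int) (k : Int), Dom_solution food_times k → Pre_solution food_times k → Spec_solution food_times k (solution food_times k)

-- ===== LEMMAS AND PROOFS =====

-- eaten amount after every food has been eaten down to level m (if it had that much)
def eatS (food_times : List Int) (m : Int) : Int := (food_times.map (fun f => min f m)).sum

theorem eatS_mono (food_times : List Int) {m m' : Int} (h : m ≤ m') :
    eatS food_times m ≤ eatS food_times m' := by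
  unfold eatS
  exact List.sum_le_sum (fun f _ => le_min (min_le_left _ _) (le_trans (min_le_right _ _) h))

theorem eatS_le_sum (food_times : List Int) (m : Int) : eatS food_times m ≤ food_times.sum := by
  unfold eatS
  calc (food_times.map (fun f => min f m)).sum ≤ (food_times.map id).sum :=
        List.sum_le_sum (fun f _ => min_le_left _ _)
    _ = food_times.sum := by simp

theorem bsearchGo_spec (food_times : List Int) (k lo hi : Int)
    (hlo : eatS food_times lo ≤ k) (hhi : ∀ m, hi < m → k < eatS food_times m)
    (hle : lo ≤ hi) :
    eatS food_times (bsearchGo food_times k lo hi) ≤ k ∧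
      k < eatS food_times (bsearchGo food_times k lo hi + 1) := by
  rw [bsearchGo]
  split
  · rename_i h
    have h2 : PySem.Int.floordiv (lo + hi + 1) 2 = (lo + hi + 1) / 2 :=
      PySem.Int.floordiv_eq_ediv_of_pos (by omega)
    dsimp only
    split
    · rename_i hmid
      exact bsearchGo_spec food_times k _ hi (by simpa [eatS] using hmid) hhi (by rw [h2]; omega)
    · rename_i hmid
      refine bsearchGo_spec food_times k lo _ hlo ?_ (by rw [h2]; omega)
      intro m hm
      exact lt_of_lt_of_le (by simpa [eatS] using hmid)
        (eatS_mono food_times (by rw [h2] at *; omega))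
  · rename_i h
    exact ⟨hlo, hhi _ (by omega)⟩
termination_by (hi - lo).toNat
decreasing_by
  · simp only [PySem.Int.floordiv_eq_ediv_of_pos (by omega : (0:Int) < 2)] at *; omega
  · simp only [PySem.Int.floordiv_eq_ediv_of_pos (by omega : (0:Int) < 2)] at *; omega

theorem eatS_unique (food_times : List Int) (k m1 m2 : Int)
    (h1 : eatS food_times m1 ≤ k) (h1' : k < eatS food_times (m1 + 1))
    (h2 : eatS food_times m2 ≤ k) (h2' : k < eatS food_times (m2 + 1)) : m1 = m2 := by
  by_contra hne
  rcases lt_or_gt_of_ne hne with h | h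
  · exact absurd (le_trans (eatS_mono food_times (by omega : m1 + 1 ≤ m2)) h2) (not_le.mpr h1')
  · exact absurd (le_trans (eatS_mono food_times (by omega : m2 + 1 ≤ m1)) h1) (not_le.mpr h2')

-- splitting eatS along a partition of the enumerated foods
theorem eatS_split (food_times : List Int) (m : Int) (xs ys : List (Int × Int))
    (hperm : (xs ++ ys).Perm ((PySem.List.enumerate food_times 1).map (fun p => (p.2, p.1))))
    (hxs : ∀ p ∈ xs, p.1 ≤ m) (hys : ∀ q ∈ ys, m ≤ q.1) :
    eatS food_times m = (xs.map (fun p => p.1)).sum + m * ys.length := by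
  have h1 : eatS food_times m = ((xs ++ ys).map (fun p => min p.1 m)).sum := by
    rw [List.Perm.sum_eq (hperm.map (fun p => min p.1 m))]
    unfold eatS
    rw [List.map_map]
    have : ((fun p => min p.1 m) ∘ fun p : Int × Int => (p.2, p.1)) =
        ((fun f => min f m) ∘ fun p : Int × Int => p.2) := rfl
    rw [this, ← List.map_map, PySem.List.map_snd_enumerate]
  rw [h1, List.map_append, List.sum_append]
  have h2 : xs.map (fun p => min p.1 m) = xs.map (fun p => p.1) :=
    List.map_congr_left (fun p hp => min_eq_left (hxs p hp))
  have h3 : ys.map (fun p => min p.1 m) = ys.map (fun _ => m) :=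
    List.map_congr_left (fun q hq => min_eq_right (hys q hq))
  rw [h2, h3, PySem.List.sum_map_const_int]
  ring

-- the stop (early-return) case of A's loop
theorem stop_case (food_times : List Int) (k0 : Int) (hk0 : 0 ≤ k0)
    (a idx : Int) (rest xs : List (Int × Int)) (prev kc : Int)
    (hperm : (xs ++ (a, idx) :: rest).Perm ((PySem.List.enumerate food_times 1).map (fun p => (p.2, p.1))))
    (_hcross : ∀ p ∈ xs, ∀ q ∈ (a, idx) :: rest, p.1 ≤ q.1)
    (hsorted : ((a, idx) :: rest).Pairwise (fun x y => x.1 ≤ y.1))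
    (hxs : ∀ p ∈ xs, p.1 ≤ prev)
    (hkc : kc = k0 - ((xs.map (fun p => p.1)).sum + prev * ((a, idx) :: rest).length))
    (hnn : 0 ≤ kc)
    (hstop : (a - prev) * (((a, idx) :: rest).length : Int) > kc) :
    (PySem.List.pyGetD (PySem.List.sorted ((a, idx) :: rest) (fun x => x.2) false)
        (PySem.Int.mod kc (((a, idx) :: rest).length : Int)) (0, 0)).2 =
      solution_alt food_times k0 := by
  have hn : (0:Int) < (((a, idx) :: rest).length : Int) := by
    simp only [List.length_cons]; positivity
  have hq0 : 0 ≤ PySem.Int.floordiv kc (((a, idx) :: rest).length : Int) := by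
    rw [PySem.Int.floordiv_eq_ediv_of_pos hn]
    exact Int.ediv_nonneg hnn (le_of_lt hn)
  have hr0 : 0 ≤ PySem.Int.mod kc (((a, idx) :: rest).length : Int) :=
    PySem.Int.mod_nonneg kc hn
  have hrlt : PySem.Int.mod kc (((a, idx) :: rest).length : Int) < (((a, idx) :: rest).length : Int) :=
    PySem.Int.mod_lt kc hn
  have hqr : PySem.Int.floordiv kc (((a, idx) :: rest).length : Int) * (((a, idx) :: rest).length : Int)
      + PySem.Int.mod kc (((a, idx) :: rest).length : Int) = kc :=
    PySem.Int.floordiv_mul_add_mod kc _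
  have hqbound : PySem.Int.floordiv kc (((a, idx) :: rest).length : Int) < a - prev := by
    rw [PySem.Int.floordiv_eq_ediv_of_pos hn]
    exact (Int.ediv_lt_iff_lt_mul hn).mpr (by linarith [hstop])
  -- the level at which A stops
  have hys_min : ∀ p ∈ (a, idx) :: rest, a ≤ p.1 := by
    intro p hp
    rcases List.mem_cons.mp hp with h | h
    · subst h; exact le_refl _
    · exact (List.pairwise_cons.mp hsorted).1 p h
  have hxs_m : ∀ p ∈ xs, p.1 ≤ prev + PySem.Int.floordiv kc (((a, idx) :: rest).length : Int) := by
    intro p hp; have := hxs p hp; omega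
  have hys_m : ∀ p ∈ (a, idx) :: rest, prev + PySem.Int.floordiv kc (((a, idx) :: rest).length : Int) ≤ p.1 := by
    intro p hp; have := hys_min p hp; omega
  have hxs_m1 : ∀ p ∈ xs, p.1 ≤ prev + PySem.Int.floordiv kc (((a, idx) :: rest).length : Int) + 1 := by
    intro p hp; have := hxs p hp; omega
  have hys_m1 : ∀ p ∈ (a, idx) :: rest, prev + PySem.Int.floordiv kc (((a, idx) :: rest).length : Int) + 1 ≤ p.1 := by
    intro p hp; have := hys_min p hp; omega
  have e2 : eatS food_times (prev + PySem.Int.floordiv kc (((a, idx) :: rest).length : Int))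
      = k0 - PySem.Int.mod kc (((a, idx) :: rest).length : Int) := by
    rw [eatS_split food_times _ xs ((a, idx) :: rest) hperm hxs_m hys_m]
    linear_combination hkc + hqr
  have e3 : eatS food_times (prev + PySem.Int.floordiv kc (((a, idx) :: rest).length : Int) + 1)
      = k0 - PySem.Int.mod kc (((a, idx) :: rest).length : Int) + (((a, idx) :: rest).length : Int) := by
    rw [eatS_split food_times _ xs ((a, idx) :: rest) hperm hxs_m1 hys_m1]
    linear_combination hkc + hqr
  have hSmk : eatS food_times (prev + PySem.Int.floordiv kc (((a, idx) :: rest).length : Int)) ≤ k0 := by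
    rw [e2]; omega
  have hSm1k : k0 < eatS food_times (prev + PySem.Int.floordiv kc (((a, idx) :: rest).length : Int) + 1) := by
    rw [e3]; omega
  have htot : k0 < food_times.sum := lt_of_lt_of_le hSm1k (eatS_le_sum _ _)
  -- the list is nonempty, so max? returns its maximum
  have hne : food_times ≠ [] := by
    intro h
    have hlen := hperm.length_eq
    simp [h] at hlen
  obtain ⟨Mv, hmax⟩ : ∃ Mv, PySem.List.max? food_times (fun x => x) = some Mv := by
    cases hmaxe : PySem.List.max? food_times (fun x => x) with
    | none => exact absurd ((PySem.List.max?_eq_none_iff _ _).mp hmaxe) hne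
    | some Mv => exact ⟨Mv, rfl⟩
  have hMmax : ∀ y ∈ food_times, y ≤ Mv := PySem.List.max?_isMax hmax
  have hM0 : 0 ≤ Mv := by
    by_contra h
    push_neg at h
    have h1 : food_times.sum ≤ 0 := by
      have h2 : (food_times.map (fun f => f)).sum ≤ (food_times.map (fun _ => (0:Int))).sum :=
        List.sum_le_sum (fun f hf => le_of_lt (lt_of_le_of_lt (hMmax f hf) h))
      simp only [List.map_id_fun', id_eq] at h2
      rw [PySem.List.sum_map_const_int] at h2
      simpa using h2
    omega
  have hS0 : eatS food_times 0 ≤ k0 := by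
    unfold eatS
    have h1 : (food_times.map (fun f => min f 0)).sum ≤ (food_times.map (fun _ => (0:Int))).sum :=
      List.sum_le_sum (fun f _ => min_le_right f 0)
    rw [PySem.List.sum_map_const_int] at h1
    simp only [mul_zero] at h1
    omega
  have hhi : ∀ m, Mv < m → k0 < eatS food_times m := by
    intro m hm
    have he : eatS food_times m = food_times.sum := by
      unfold eatS
      rw [List.map_congr_left (fun f hf => min_eq_left (by have := hMmax f hf; omega))]
      simp
    rw [he]; exact htot
  have hb := bsearchGo_spec food_times k0 0 Mv hS0 hhi hM0
  have hmb : bsearchGo food_times k0 0 Mv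
      = prev + PySem.Int.floordiv kc (((a, idx) :: rest).length : Int) :=
    eatS_unique food_times k0 _ _ hb.1 hb.2 hSmk hSm1k
  have hMv : (PySem.List.max? food_times (fun x => x)).getD 0 = Mv := by rw [hmax]; rfl
  -- the remaining foods, in index order
  have hLperm : (((PySem.List.enumerate food_times 1).filter
        (fun p => decide (prev + PySem.Int.floordiv kc (((a, idx) :: rest).length : Int) < p.2))).map
        (fun p => (p.2, p.1))).Perm ((a, idx) :: rest) := by
    have hf := List.Perm.filter
      (fun p : Int × Int => decide (prev + PySem.Int.floordiv kc (((a, idx) :: rest).length : Int) < p.1))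
      hperm.symm
    rw [List.filter_append] at hf
    have hxnil : xs.filter
        (fun p => decide (prev + PySem.Int.floordiv kc (((a, idx) :: rest).length : Int) < p.1)) = [] :=
      List.filter_eq_nil_iff.mpr (fun p hp => by simpa using not_lt.mpr (hxs_m p hp))
    have hyall : ((a, idx) :: rest).filter
        (fun p => decide (prev + PySem.Int.floordiv kc (((a, idx) :: rest).length : Int) < p.1))
        = (a, idx) :: rest :=
      List.filter_eq_self.mpr (fun p hp => by
        have h1 := hys_m1 p hp
        simpa using (by omega : prev + PySem.Int.floordiv kc (((a, idx) :: rest).length : Int) < p.1))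
    rw [hxnil, hyall, List.nil_append, List.filter_map] at hf
    simpa [Function.comp] using hf
  have hLpair : (((PySem.List.enumerate food_times 1).filter
        (fun p => decide (prev + PySem.Int.floordiv kc (((a, idx) :: rest).length : Int) < p.2))).map
        (fun p => (p.2, p.1))).Pairwise (fun x y => x.2 < y.2) := by
    rw [List.pairwise_map]
    exact List.Pairwise.filter _ (PySem.List.pairwise_lt_enumerate food_times 1)
  have hsortedys : PySem.List.sorted ((a, idx) :: rest) (fun x => x.2) false
      = ((PySem.List.enumerate food_times 1).filter
        (fun p => decide (prev + PySem.Int.floordiv kc (((a, idx) :: rest).length : Int) < p.2))).map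
        (fun p => (p.2, p.1)) :=
    PySem.List.sorted_eq_of_perm_of_pairwise_lt _ _ _ hLperm hLpair
  have hLlen : ((((PySem.List.enumerate food_times 1).filter
        (fun p => decide (prev + PySem.Int.floordiv kc (((a, idx) :: rest).length : Int) < p.2))).map
        (fun p => (p.2, p.1))).length : Int) = (((a, idx) :: rest).length : Int) := by
    exact_mod_cast hLperm.length_eq
  -- evaluate both sides at the common index
  have e2' : (List.map (fun f => min f (prev + PySem.Int.floordiv kc (((a, idx) :: rest).length : Int)))
      food_times).sum = k0 - PySem.Int.mod kc (((a, idx) :: rest).length : Int) := e2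
  simp only [solution_alt, hMv, hmb]
  rw [if_neg (not_le.mpr htot), e2', hsortedys]
  have hridx : k0 - (k0 - PySem.Int.mod kc (((a, idx) :: rest).length : Int))
      = PySem.Int.mod kc (((a, idx) :: rest).length : Int) := by ring
  rw [hridx]
  rw [PySem.List.pyGetD_eq_getElem _ (0, 0) hr0 (by omega)]
  rw [PySem.List.pyGetD_eq_getElem _ 0 hr0 (by
    rw [List.length_map] at hLlen ⊢
    omega)]
  rw [List.getElem_map, List.getElem_map]

-- the main loop invariant for A
theorem solutionGo_eq (food_times : List Int) (k0 : Int) (hk0 : 0 ≤ k0)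
    (ys xs : List (Int × Int)) (prev kc : Int)
    (hperm : (xs ++ ys).Perm ((PySem.List.enumerate food_times 1).map (fun p => (p.2, p.1))))
    (hcross : ∀ p ∈ xs, ∀ q ∈ ys, p.1 ≤ q.1)
    (hsorted : ys.Pairwise (fun a b => a.1 ≤ b.1))
    (hxs : ∀ p ∈ xs, p.1 ≤ prev)
    (hkc : kc = k0 - ((xs.map (fun p => p.1)).sum + prev * ys.length))
    (hnn : 0 ≤ kc) :
    solutionGo ys ys.length kc prev = solution_alt food_times k0 := by
  induction ys generalizing xs prev kc with
  | nil =>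
    have e1 : List.map ((fun p : Int × Int => p.1) ∘ fun p : Int × Int => (p.2, p.1))
        (PySem.List.enumerate food_times 1) = food_times := PySem.List.map_snd_enumerate food_times 1
    have hsum : (List.map (fun p : Int × Int => p.1) xs).sum = food_times.sum := by
      have h := (hperm.map (fun p => p.1)).sum_eq
      rw [List.append_nil] at h
      rw [h, List.map_map, e1]
    rw [hsum] at hkc
    have htot : food_times.sum ≤ k0 := by
      simp only [List.length_nil, Nat.cast_zero, mul_zero, add_zero] at hkc
      omega
    simp only [solutionGo, solution_alt]
    rw [if_pos htot]
  | cons hd rest ih =>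
    obtain ⟨a, idx⟩ := hd
    simp only [solutionGo]
    by_cases hstop : (a - prev) * ((a, idx) :: rest).length > kc
    · rw [if_pos (by exact_mod_cast hstop)]
      exact stop_case food_times k0 hk0 a idx rest xs prev kc hperm hcross hsorted hxs hkc hnn
        (by exact_mod_cast hstop)
    · rw [if_neg (by exact_mod_cast hstop)]
      have hysub : ∀ q ∈ rest, a ≤ q.1 := fun q hq => (List.pairwise_cons.mp hsorted).1 q hq
      have hcross' : ∀ p ∈ xs ++ [(a, idx)], ∀ q ∈ rest, p.1 ≤ q.1 := by
        intro p hp q hq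
        rcases List.mem_append.mp hp with h | h
        · exact hcross p h q (List.mem_cons_of_mem _ hq)
        · simp at h; subst h; exact hysub q hq
      have hxs' : ∀ p ∈ xs ++ [(a, idx)], p.1 ≤ a := by
        intro p hp
        rcases List.mem_append.mp hp with h | h
        · exact hcross p h (a, idx) List.mem_cons_self
        · simp at h; subst h; exact le_refl _
      have hkc' : kc - (a - prev) * ((a, idx) :: rest).length =
          k0 - (((xs ++ [(a, idx)]).map (fun p => p.1)).sum + a * rest.length) := by
        rw [hkc]
        simp only [List.map_append, List.sum_append, List.map_cons, List.map_nil,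
          List.sum_cons, List.sum_nil, List.length_cons]
        push_cast
        ring
      have := ih (xs ++ [(a, idx)]) a (kc - (a - prev) * ((a, idx) :: rest).length)
        (by
          refine List.Perm.trans ?_ hperm
          simp [List.append_assoc])
        hcross' (List.pairwise_cons.mp hsorted).2 hxs' hkc' (by omega)
      convert this using 2
      simp only [List.length_cons]
      push_cast
      ring

-- ===== VERDICT (by name: the statement is the Claim_ definition above) =====
theorem solution_spec : Claim_equal_solution := by
  intro food_times k _ hpre
  unfold Spec_solution solution
  have := solutionGo_eq food_times k hpre
    (PySem.List.sorted ((PySem.List.enumerate food_times 1).map (fun p => (p.2, p.1))) (fun x => x.1) false)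
    [] 0 k (by simpa using PySem.List.sorted_perm _ _ _)
    (by simp) (PySem.List.sorted_pairwise _ _) (by simp) (by simp) hpre
  simp only [PySem.List.length_sorted, List.length_map, PySem.List.length_enumerate] at this
  simpa using this
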